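-- pv_equiv track=rewrite | github.com/weiyangzen/awesome_algorithms | Algorithms/数学-数论-0039-威佐夫博弈算法/demo.py | legal_moves
-- ===== SOURCE A (Python) =====
-- from typing import List, Optional, Tuple
--
-- Position = Tuple[int, int]
--
-- def normalize(a: int, b: int) -> Position:
--     """Return position in canonical order (small, large)."""
--     if a < 0 or b < 0:
--         raise ValueError(f"Heap sizes must be non-negative, got ({a}, {b}).")
--     return (a, b) if a <= b else (b, a)
--
-- def legal_moves(a: int, b: int) -> List[Position]:
--     """Enumerate all legal next positions under Wythoff's game rules."""
--     x, y = normalize(a, b)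
--     moves = set()
--
--     # Remove from pile x only.
--     for t in range(1, x + 1):
--         moves.add((x - t, y))
--
--     # Remove from pile y only.
--     for t in range(1, y + 1):
--         nx, ny = x, y - t
--         moves.add((nx, ny) if nx <= ny else (ny, nx))
--
--     # Remove same amount from both piles.
--     for t in range(1, x + 1):
--         moves.add((x - t, y - t))
--
--     return sorted(moves)
-- ===== SOURCE B (Python) =====
-- from typing import List, Tuple
--
-- Position = Tuple[int, int]
--
-- def legal_moves(a: int, b: int) -> List[Position]:
--     """Emit the legal next positions directly in sorted order, without a set or a sort.
--
--     For x <= y and d = y - x, the distinct moves with first coordinate i < x are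
--     (i, i+d) [diagonal], (i, x) [mirror of shrinking y past x] and (i, y)
--     [shrinking x]; those with first coordinate x are (x, j) for x <= j < y.
--     Each group is emitted with its <=3 second coordinates in order."""
--     if a < 0 or b < 0:
--         raise ValueError(f"Heap sizes must be non-negative, got ({a}, {b}).")
--     x, y = (a, b) if a <= b else (b, a)
--     d = y - x
--     out: List[Position] = []
--     for i in range(x):
--         s = i + d
--         if s < x:
--             out.append((i, s))
--             out.append((i, x))
--             if x < y:
--                 out.append((i, y))
--         elif s == x:
--             out.append((i, x))
--             if x < y:
--                 out.append((i, y))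
--         else:
--             out.append((i, x))
--             out.append((i, s))
--             out.append((i, y))
--     for j in range(x, y):
--         out.append((x, j))
--     return out
-- ===== Notes on version B (the rewrite author's own statement) =====
-- stated objective: faster
-- what changed: B drops A's set-building and global sort: it emits the moves directly in lexicographic order, one first coordinate at a time (each i < x contributes its at-most-3 distinct second coordinates {i+(y-x), x, y} in order, then the (x, j) tail), so no set and no O(n log n) sort is needed.
import Mathlib
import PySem

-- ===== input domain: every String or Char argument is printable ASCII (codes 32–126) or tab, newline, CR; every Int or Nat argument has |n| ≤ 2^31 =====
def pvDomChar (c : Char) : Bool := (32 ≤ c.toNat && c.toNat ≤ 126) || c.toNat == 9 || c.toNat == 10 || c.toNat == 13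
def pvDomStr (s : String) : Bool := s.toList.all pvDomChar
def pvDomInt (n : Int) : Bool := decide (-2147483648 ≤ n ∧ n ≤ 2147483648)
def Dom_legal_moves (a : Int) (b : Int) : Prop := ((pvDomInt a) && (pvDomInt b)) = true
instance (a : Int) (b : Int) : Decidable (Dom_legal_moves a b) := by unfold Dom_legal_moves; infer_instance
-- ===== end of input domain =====

-- B replaces A's set-plus-sort by emitting the moves directly in sorted order, one first
-- coordinate at a time (O(n) instead of O(n log n), measurably faster at large sizes).

-- ===== PORT A =====
-- Python's sorted() on tuples compares lexicographically: ported exactly as sorting by the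
-- injective key 'toLex' into the lexicographic linear order on Int × Int.
def legal_moves (a : Int) (b : Int) : List (Int × Int) :=
  let xy := if a ≤ b then (a, b) else (b, a)   -- normalize(a, b); ValueError on negatives is excluded by Pre_
  let x := xy.1
  let y := xy.2
  let moves : PySem.Set (Int × Int) := PySem.Set.empty
  -- for t in range(1, x + 1): moves.add((x - t, y))
  let moves := (PySem.List.pyRange 1 (x + 1)).foldl
    (fun s t => PySem.Set.add s (x - t, y)) moves
  -- for t in range(1, y + 1): nx, ny = x, y - t; moves.add((nx, ny) if nx <= ny else (ny, nx))
  let moves := (PySem.List.pyRange 1 (y + 1)).foldl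
    (fun s t =>
      let nx := x
      let ny := y - t
      PySem.Set.add s (if nx ≤ ny then (nx, ny) else (ny, nx))) moves
  -- for t in range(1, x + 1): moves.add((x - t, y - t))
  let moves := (PySem.List.pyRange 1 (x + 1)).foldl
    (fun s t => PySem.Set.add s (x - t, y - t)) moves
  PySem.List.sorted moves (fun p => toLex p)

-- ===== PORT B =====
def legal_moves_alt (a : Int) (b : Int) : List (Int × Int) :=
  let xy := if a ≤ b then (a, b) else (b, a)
  let x := xy.1
  let y := xy.2
  let d := y - x
  let out := (PySem.List.pyRange 0 x).foldl
    (fun out i =>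
      let s := i + d
      if s < x then
        (out ++ [(i, s)] ++ [(i, x)]) ++ (if x < y then [(i, y)] else [])
      else if s = x then
        (out ++ [(i, x)]) ++ (if x < y then [(i, y)] else [])
      else
        out ++ [(i, x)] ++ [(i, s)] ++ [(i, y)]) ([] : List (Int × Int))
  (PySem.List.pyRange x y).foldl (fun out j => out ++ [(x, j)]) out

-- ===== PRECONDITION & SPEC =====
-- Pre_ excludes exactly the inputs where A's normalize raises ValueError (a negative heap).
def Pre_legal_moves (a : Int) (b : Int) : Prop := 0 ≤ a ∧ 0 ≤ b
instance (a : Int) (b : Int) : Decidable (Pre_legal_moves a b) := by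
  unfold Pre_legal_moves; infer_instance
def pvWitness_legal_moves : Int × Int := (3, 5)
def Spec_legal_moves (a : Int) (b : Int) (out : List (Int × Int)) : Prop := out = legal_moves_alt a b
instance (a : Int) (b : Int) (out : List (Int × Int)) : Decidable (Spec_legal_moves a b out) := by
  unfold Spec_legal_moves; infer_instance

-- ===== CLAIM (what is proved, stated in full; the proofs are below) =====
def Claim_equal_legal_moves : Prop := ∀ (a : Int) (b : Int), Dom_legal_moves a b → Pre_legal_moves a b → Spec_legal_moves a b (legal_moves a b)

-- ===== LEMMAS AND PROOFS =====

-- The set of legal moves from the normalized position (x, y), as a predicate.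
def pvMem (x y : Int) (p : Int × Int) : Prop :=
  (0 ≤ p.1 ∧ p.1 < x ∧ (p.2 = x ∨ p.2 = y ∨ p.2 = p.1 + (y - x))) ∨
  (p.1 = x ∧ x ≤ p.2 ∧ p.2 < y)

-- Membership in a fold of Set.add.
theorem pv_mem_foldl_add (l : List Int) (f : Int → Int × Int) (s : PySem.Set (Int × Int))
    (p : Int × Int) :
    p ∈ l.foldl (fun s t => PySem.Set.add s (f t)) s ↔ p ∈ s ∨ ∃ t ∈ l, p = f t := by
  induction l generalizing s with
  | nil => simp
  | cons h t ih => simp [ih, PySem.Set.mem_add]; tauto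

-- A fold of Set.add keeps the list duplicate-free.
theorem pv_nodup_foldl_add (l : List Int) (f : Int → Int × Int) (s : PySem.Set (Int × Int))
    (hs : s.Nodup) : (l.foldl (fun s t => PySem.Set.add s (f t)) s).Nodup := by
  induction l generalizing s with
  | nil => exact hs
  | cons h t ih => exact ih _ (PySem.Set.nodup_add _ _ hs)

-- The per-i block emitted by B's main loop.
def pvBlock (x y i : Int) : List (Int × Int) :=
  let s := i + (y - x)
  if s < x then
    [(i, s)] ++ [(i, x)] ++ (if x < y then [(i, y)] else [])
  else if s = x then
    [(i, x)] ++ (if x < y then [(i, y)] else [])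
  else
    [(i, x)] ++ [(i, s)] ++ [(i, y)]

theorem pv_alt_core (x y : Int) :
    ((PySem.List.pyRange 0 x).foldl
      (fun out i =>
        let s := i + (y - x)
        if s < x then
          (out ++ [(i, s)] ++ [(i, x)]) ++ (if x < y then [(i, y)] else [])
        else if s = x then
          (out ++ [(i, x)]) ++ (if x < y then [(i, y)] else [])
        else
          out ++ [(i, x)] ++ [(i, s)] ++ [(i, y)]) ([] : List (Int × Int))) =
    (PySem.List.pyRange 0 x).flatMap (pvBlock x y) := by
  have h : (fun (out : List (Int × Int)) (i : Int) =>
      let s := i + (y - x)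
      if s < x then
        (out ++ [(i, s)] ++ [(i, x)]) ++ (if x < y then [(i, y)] else [])
      else if s = x then
        (out ++ [(i, x)]) ++ (if x < y then [(i, y)] else [])
      else
        out ++ [(i, x)] ++ [(i, s)] ++ [(i, y)]) =
      (fun out i => out ++ pvBlock x y i) := by
    funext out i
    simp only [pvBlock]
    split_ifs <;> simp
  rw [h, PySem.List.foldl_append_eq_flatMap]
  simp

theorem pv_fst_mem_block (x y i : Int) (p : Int × Int) (hp : p ∈ pvBlock x y i) : p.1 = i := by
  simp only [pvBlock] at hp
  split_ifs at hp <;> simp_all <;> rcases hp with h | h | h <;> simp_all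

theorem pv_mem_block_iff (x y i : Int) (hxy : x ≤ y) (_hi0 : 0 ≤ i) (hix : i < x)
    (p : Int × Int) :
    p ∈ pvBlock x y i ↔ p.1 = i ∧ (p.2 = x ∨ p.2 = y ∨ p.2 = i + (y - x)) := by
  simp only [pvBlock]
  split_ifs with h1 h2 h3 h4 <;> simp [Prod.ext_iff] <;> omega

theorem pv_mem_alt (x y : Int) (_hx : 0 ≤ x) (hxy : x ≤ y) (p : Int × Int) :
    p ∈ (PySem.List.pyRange 0 x).flatMap (pvBlock x y) ++
        (PySem.List.pyRange x y).map (fun j => (x, j)) ↔ pvMem x y p := by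
  simp only [List.mem_append, List.mem_flatMap, List.mem_map, PySem.List.mem_pyRange_one,
    pvMem]
  constructor
  · rintro (⟨i, ⟨hi0, hix⟩, hp⟩ | ⟨j, ⟨hj1, hj2⟩, hp⟩)
    · rcases (pv_mem_block_iff x y i hxy hi0 hix p).mp hp with ⟨h1, h2⟩
      left; omega
    · right; rw [← hp]; simp; omega
  · rintro (⟨h0, hx1, h2⟩ | ⟨h1, h2, h3⟩)
    · left
      exact ⟨p.1, ⟨h0, hx1⟩, (pv_mem_block_iff x y p.1 hxy h0 hx1 p).mpr ⟨rfl, h2⟩⟩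
    · right
      exact ⟨p.2, ⟨h2, h3⟩, by rw [← h1]⟩

theorem pv_pairwise_block (x y i : Int) (hi : i < x) :
    (pvBlock x y i).Pairwise (fun p q => (toLex p : Lex (Int × Int)) < toLex q) := by
  simp only [pvBlock]
  split_ifs with h1 h2 h3 h4 <;>
    simp [Prod.Lex.toLex_lt_toLex] <;> omega

theorem pv_pairwise_pyRange (a b : Int) :
    (PySem.List.pyRange a b).Pairwise (· < ·) := by
  rw [PySem.List.pyRange_of_pos a b (by norm_num : (0:Int) < 1)]
  refine List.Pairwise.map _ ?_ List.pairwise_lt_range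
  intro k l hkl
  omega

theorem pv_pairwise_alt (x y : Int) (_hx : 0 ≤ x) (_hxy : x ≤ y) :
    ((PySem.List.pyRange 0 x).flatMap (pvBlock x y) ++
        (PySem.List.pyRange x y).map (fun j => (x, j))).Pairwise
      (fun p q => (toLex p : Lex (Int × Int)) < toLex q) := by
  rw [List.pairwise_append]
  refine ⟨?_, ?_, ?_⟩
  · rw [List.pairwise_flatMap]
    constructor
    · intro i hi
      exact pv_pairwise_block x y i ((PySem.List.mem_pyRange_one).mp hi).2
    · refine (pv_pairwise_pyRange 0 x).imp ?_
      intro i j hij p hp q hq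
      rw [Prod.Lex.toLex_lt_toLex]
      left
      rw [pv_fst_mem_block x y i p hp, pv_fst_mem_block x y j q hq]
      exact hij
  · refine List.Pairwise.map _ ?_ (pv_pairwise_pyRange x y)
    intro j k hjk
    rw [Prod.Lex.toLex_lt_toLex]
    right
    exact ⟨rfl, hjk⟩
  · intro p hp q hq
    rw [List.mem_flatMap] at hp
    rcases hp with ⟨i, hi, hp⟩
    rcases List.mem_map.mp hq with ⟨j, _, hq⟩
    rw [Prod.Lex.toLex_lt_toLex]
    left
    rw [pv_fst_mem_block x y i p hp, ← hq]
    exact ((PySem.List.mem_pyRange_one).mp hi).2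

-- Membership in A's set of moves.
theorem pv_mem_A (x y : Int) (_hx : 0 ≤ x) (_hxy : x ≤ y) (p : Int × Int) :
    p ∈ ((PySem.List.pyRange 1 (x + 1)).foldl
          (fun s t => PySem.Set.add s (x - t, y - t))
          ((PySem.List.pyRange 1 (y + 1)).foldl
            (fun s t =>
              let nx := x
              let ny := y - t
              PySem.Set.add s (if nx ≤ ny then (nx, ny) else (ny, nx)))
            ((PySem.List.pyRange 1 (x + 1)).foldl
              (fun s t => PySem.Set.add s (x - t, y)) PySem.Set.empty))) ↔
    pvMem x y p := by
  rw [pv_mem_foldl_add, pv_mem_foldl_add, pv_mem_foldl_add]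
  simp only [PySem.List.mem_pyRange_one, PySem.Set.empty, List.not_mem_nil, false_or, pvMem]
  constructor
  · rintro ((((⟨t, ht, hp⟩ | ⟨t, ht, hp⟩) | ⟨t, ht, hp⟩)))
    · subst hp; left; simp; omega
    · by_cases hc : x ≤ y - t
      · simp only [if_pos hc] at hp; subst hp; right; simp; omega
      · simp only [if_neg hc] at hp; subst hp; left; simp; omega
    · subst hp; left; simp; omega
  · rintro (⟨h0, h1, (h2 | h2 | h2)⟩ | ⟨h1, h2, h3⟩)
    · -- p = (p.1, x): from the second loop with t = y - p.1
      left; right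
      refine ⟨y - p.1, by omega, ?_⟩
      have hc : ¬ x ≤ y - (y - p.1) := by omega
      simp only [if_neg hc]
      have : y - (y - p.1) = p.1 := by omega
      rw [this, ← h2]
    · -- p = (p.1, y): from the first loop with t = x - p.1
      left; left
      refine ⟨x - p.1, by omega, ?_⟩
      have : x - (x - p.1) = p.1 := by omega
      rw [this, ← h2]
    · -- diagonal: third loop with t = x - p.1
      right
      refine ⟨x - p.1, by omega, ?_⟩
      have h3 : x - (x - p.1) = p.1 := by omega
      have h4 : y - (x - p.1) = p.1 + (y - x) := by omega
      rw [h3, h4, ← h2]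
    · -- p = (x, p.2) with x ≤ p.2 < y: second loop with t = y - p.2
      left; right
      refine ⟨y - p.2, by omega, ?_⟩
      have hc : x ≤ y - (y - p.2) := by omega
      simp only [if_pos hc]
      have : y - (y - p.2) = p.2 := by omega
      rw [this, ← h1]

-- The core equality on a normalized position.
theorem pv_core (x y : Int) (hx : 0 ≤ x) (hxy : x ≤ y) :
    legal_moves_alt x y = legal_moves x y ∧
    legal_moves_alt x y =
      (PySem.List.pyRange 0 x).flatMap (pvBlock x y) ++
        (PySem.List.pyRange x y).map (fun j => (x, j)) := by
  have halt : legal_moves_alt x y =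
      (PySem.List.pyRange 0 x).flatMap (pvBlock x y) ++
        (PySem.List.pyRange x y).map (fun j => (x, j)) := by
    simp only [legal_moves_alt, if_pos hxy]
    rw [pv_alt_core, PySem.List.foldl_append_singleton_eq_map]
  refine ⟨?_, halt⟩
  simp only [legal_moves, if_pos hxy]
  have hpw := pv_pairwise_alt x y hx hxy
  have hnodupB : ((PySem.List.pyRange 0 x).flatMap (pvBlock x y) ++
      (PySem.List.pyRange x y).map (fun j => (x, j))).Nodup := by
    refine hpw.imp ?_
    intro p q hlt heq
    subst heq
    exact absurd hlt (lt_irrefl _)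
  have hnodupA := pv_nodup_foldl_add (PySem.List.pyRange 1 (x + 1)) (fun t => (x - t, y - t)) _
    (pv_nodup_foldl_add (PySem.List.pyRange 1 (y + 1))
      (fun t => if x ≤ y - t then (x, y - t) else (y - t, x)) _
      (pv_nodup_foldl_add (PySem.List.pyRange 1 (x + 1)) (fun t => (x - t, y))
        PySem.Set.empty List.nodup_nil))
  rw [halt]
  symm
  refine PySem.List.sorted_eq_of_perm_of_pairwise_lt _ _ _ ?_ hpw
  rw [List.perm_ext_iff_of_nodup hnodupB hnodupA]
  intro p
  rw [pv_mem_alt x y hx hxy p, pv_mem_A x y hx hxy p]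

-- ===== VERDICT (by name: the statement is the Claim_ definition above) =====
theorem legal_moves_spec : Claim_equal_legal_moves := by
  intro a b _ hpre
  unfold Spec_legal_moves
  by_cases hab : a ≤ b
  · have := (pv_core a b hpre.1 hab).1
    simp only [legal_moves, legal_moves_alt, if_pos hab] at *
    exact this.symm
  · have hba : b ≤ a := le_of_not_ge hab
    have := (pv_core b a hpre.2 hba).1
    simp only [legal_moves, legal_moves_alt, if_pos hba, if_neg hab] at *
    exact this.symm
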